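-- pv_equiv track=rewrite | github.com/mrvollger/cmpSeq | samPerID.py | stepStats
-- ===== SOURCE A (Python) =====
-- I=1 #I	BAM_CINS	1
--
-- D=2 #D	BAM_CDEL	2
--
-- E=7 #=	BAM_CEQUAL	7
--
-- X=8 #X	BAM_CDIFF	8
--
-- def stepStats(step):
-- 	match = 0
-- 	mismatch = 0
-- 	ins = 0
-- 	dele = 0
-- 	insEvent = 0
-- 	delEvent = 0
-- 	for aln_type, num in step:
-- 		if(aln_type == E):
-- 			match += num
-- 		elif(aln_type == X):
-- 			mismatch += num
-- 		elif(aln_type == I):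
-- 			insEvent += 1
-- 			ins += num
-- 		elif(aln_type == D):
-- 			delEvent += 1
-- 			dele += num
-- 	stats = {"match":match, "mismatch":mismatch, "ins":ins, "del":dele, "insEvent":insEvent, "delEvent":delEvent}
-- 	return(stats)
-- ===== SOURCE B (Python) =====
-- I=1
-- D=2
-- E=7
-- X=8
--
-- def stepStats(step):
--     steps = list(step)
--     return {
--         "match":    sum(n for t, n in steps if t == E),
--         "mismatch": sum(n for t, n in steps if t == X),
--         "ins":      sum(n for t, n in steps if t == I),
--         "del":      sum(n for t, n in steps if t == D),
--         "insEvent": sum(1 for t, n in steps if t == I),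
--         "delEvent": sum(1 for t, n in steps if t == D),
--     }
-- ===== Notes on version B (the rewrite author's own statement) =====
-- stated objective: simpler
-- what changed: Replaces the single accumulating loop over six counters with six independent filtered-sum comprehensions over a materialized list, one per output field.
import Mathlib
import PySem

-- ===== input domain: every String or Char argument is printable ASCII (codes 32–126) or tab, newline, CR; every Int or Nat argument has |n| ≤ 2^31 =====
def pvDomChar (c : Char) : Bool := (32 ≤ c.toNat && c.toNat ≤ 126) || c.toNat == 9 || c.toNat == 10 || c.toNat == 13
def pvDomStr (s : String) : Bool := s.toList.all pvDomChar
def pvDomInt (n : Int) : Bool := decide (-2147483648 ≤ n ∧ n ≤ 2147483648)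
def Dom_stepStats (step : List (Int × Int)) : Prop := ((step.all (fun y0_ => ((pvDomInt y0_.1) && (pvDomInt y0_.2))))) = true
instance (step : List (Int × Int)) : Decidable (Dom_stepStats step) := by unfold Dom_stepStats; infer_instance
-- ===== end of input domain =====

-- ===== PORT A =====
-- One honest line: B recomputes each of the six fields by its own filtered sum over the list; objective: simpler.
def stepStats (step : List (Int × Int)) : List (String × Int) :=
  let s := step.foldl
    (fun (acc : Int × Int × Int × Int × Int × Int) p =>
      let (m, mm, ins, dele, ie, de) := acc
      let (t, n) := p
      if t = 7 then (m + n, mm, ins, dele, ie, de)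
      else if t = 8 then (m, mm + n, ins, dele, ie, de)
      else if t = 1 then (m, mm, ins + n, dele, ie + 1, de)
      else if t = 2 then (m, mm, ins, dele + n, ie, de + 1)
      else acc)
    (0, 0, 0, 0, 0, 0)
  [("match", s.1), ("mismatch", s.2.1), ("ins", s.2.2.1), ("del", s.2.2.2.1),
   ("insEvent", s.2.2.2.2.1), ("delEvent", s.2.2.2.2.2)]

-- ===== PORT B =====
def sumIf (step : List (Int × Int)) (t : Int) : Int :=
  ((step.filter (fun p => p.1 = t)).map (fun p => p.2)).sum
def countIf (step : List (Int × Int)) (t : Int) : Int :=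
  ((step.filter (fun p => p.1 = t)).map (fun _ => (1 : Int))).sum
def stepStats_alt (step : List (Int × Int)) : List (String × Int) :=
  [("match", sumIf step 7), ("mismatch", sumIf step 8), ("ins", sumIf step 1),
   ("del", sumIf step 2), ("insEvent", countIf step 1), ("delEvent", countIf step 2)]

-- ===== PRECONDITION & SPEC =====
def Spec_stepStats (step : List (Int × Int)) (out : List (String × Int)) : Prop := out = stepStats_alt step
instance (step : List (Int × Int)) (out : List (String × Int)) : Decidable (Spec_stepStats step out) := by unfold Spec_stepStats; infer_instance

-- ===== CLAIM (what is proved, stated in full; the proofs are below) =====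
def Claim_equal_stepStats : Prop := ∀ (step : List (Int × Int)), Dom_stepStats step → Spec_stepStats step (stepStats step)

-- ===== LEMMAS AND PROOFS =====

-- ===== VERDICT (by name: the statement is the Claim_ definition above) =====
theorem sumIf_cons (t n u : Int) (rest : List (Int × Int)) :
    sumIf ((t, n) :: rest) u = (if t = u then n else 0) + sumIf rest u := by
  simp [sumIf, List.filter_cons]; split_ifs <;> simp

theorem countIf_cons (t n u : Int) (rest : List (Int × Int)) :
    countIf ((t, n) :: rest) u = (if t = u then 1 else 0) + countIf rest u := by
  simp [countIf, List.filter_cons]; split_ifs <;> simp <;> omega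

theorem foldl_stats (step : List (Int × Int)) (m mm ins dele ie de : Int) :
    step.foldl
      (fun (acc : Int × Int × Int × Int × Int × Int) p =>
        let (m, mm, ins, dele, ie, de) := acc
        let (t, n) := p
        if t = 7 then (m + n, mm, ins, dele, ie, de)
        else if t = 8 then (m, mm + n, ins, dele, ie, de)
        else if t = 1 then (m, mm, ins + n, dele, ie + 1, de)
        else if t = 2 then (m, mm, ins, dele + n, ie, de + 1)
        else acc)
      (m, mm, ins, dele, ie, de)
    = (m + sumIf step 7, mm + sumIf step 8, ins + sumIf step 1, dele + sumIf step 2,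
       ie + countIf step 1, de + countIf step 2) := by
  induction step generalizing m mm ins dele ie de with
  | nil => simp [sumIf, countIf]
  | cons p rest ih =>
    obtain ⟨t, n⟩ := p
    simp only [List.foldl_cons]
    by_cases h7 : t = 7 <;> by_cases h8 : t = 8 <;> by_cases h1 : t = 1 <;> by_cases h2 : t = 2 <;>
      simp [h7, h8, h1, h2, ih, sumIf_cons, countIf_cons, Prod.mk.injEq] <;>
      omega

theorem stepStats_spec : Claim_equal_stepStats := by
  intro step _
  unfold Spec_stepStats stepStats stepStats_alt
  simp only [foldl_stats]
  norm_num
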